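-- pv_equiv track=rewrite | github.com/zofialuther/CS8395-08-Paper1-updated | data/translated-code/direct-translations/haskell/Fusc-sequence.py | go
-- ===== SOURCE A (Python) =====
-- def go(n):
--     if n == 0:
--         return (1, 0)
--     elif n % 2 == 0:
--         x, y = go(n // 2)
--         return (x + y, y)
--     else:
--         x, y = go(n // 2)
--         return (x, x + y)
-- ===== SOURCE B (Python) =====
-- def go(n):
--     bits = []
--     m = n
--     while m > 0:
--         bits.append(m % 2)
--         m //= 2
--     x, y = 1, 0
--     for b in reversed(bits):
--         if b == 0:
--             x, y = x + y, y
--         else: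
--             x, y = x, x + y
--     return (x, y)
-- ===== Notes on version B (the rewrite author's own statement) =====
-- stated objective: alternative
-- what changed: Replaces the halving binary recursion with an explicit loop: collect n's bits by halving, then replay them most-significant-first over a (x, y) pair accumulator.
import Mathlib
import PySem

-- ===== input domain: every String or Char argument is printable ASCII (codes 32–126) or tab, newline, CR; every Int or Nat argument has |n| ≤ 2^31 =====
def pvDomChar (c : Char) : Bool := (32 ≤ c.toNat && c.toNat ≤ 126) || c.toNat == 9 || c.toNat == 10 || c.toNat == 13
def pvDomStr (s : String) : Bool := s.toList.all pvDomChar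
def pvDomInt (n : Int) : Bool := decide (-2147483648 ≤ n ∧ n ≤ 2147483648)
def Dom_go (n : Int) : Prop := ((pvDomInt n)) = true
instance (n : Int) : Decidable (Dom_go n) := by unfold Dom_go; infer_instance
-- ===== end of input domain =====

-- B replaces A's binary recursion on n//2 with an explicit bit-stack loop (same cost, different decomposition).


-- ===== PORT A =====
-- the 'n ≤ 0' early exit is a totality guard only: Pre_go restricts to 0 ≤ n,
-- and at n = 0 it returns the same (1, 0) as A's first branch
def go (n : Int) : Int × Int :=
  if n = 0 then (1, 0)
  else if n ≤ 0 then (1, 0)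
  else if PySem.Int.mod n 2 = 0 then
    let p := go (PySem.Int.floordiv n 2)
    (p.1 + p.2, p.2)
  else
    let p := go (PySem.Int.floordiv n 2)
    (p.1, p.1 + p.2)
termination_by n.toNat
decreasing_by
  all_goals
    have h1 : 0 ≤ PySem.Int.floordiv n 2 := by
      rw [PySem.Int.floordiv_eq_ediv_of_pos (by omega)]; omega
    have h2 : PySem.Int.floordiv n 2 < n := by
      rw [PySem.Int.floordiv_eq_ediv_of_pos (by omega)]; omega
    omega

-- ===== PORT B =====
-- bits of m, least-significant first (Source B's while-loop)
def goBits (m : Int) : List Int :=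
  if 0 < m then PySem.Int.mod m 2 :: goBits (PySem.Int.floordiv m 2) else []
termination_by m.toNat
decreasing_by
  have h1 : 0 ≤ PySem.Int.floordiv m 2 := by
    rw [PySem.Int.floordiv_eq_ediv_of_pos (by omega)]; omega
  have h2 : PySem.Int.floordiv m 2 < m := by
    rw [PySem.Int.floordiv_eq_ediv_of_pos (by omega)]; omega
  omega

def goStep (p : Int × Int) (b : Int) : Int × Int :=
  if b = 0 then (p.1 + p.2, p.2) else (p.1, p.1 + p.2)

def go_alt (n : Int) : Int × Int :=
  (goBits n).reverse.foldl goStep (1, 0)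

-- ===== PRECONDITION & SPEC =====
-- A recurses forever on negative n (floor-halving a negative number is eventually a fixed point), so Pre_go is the natural non-negative domain
def Pre_go (n : Int) : Prop := 0 ≤ n
instance (n : Int) : Decidable (Pre_go n) := by unfold Pre_go; infer_instance
def pvWitness_go : Int := 6

def Spec_go (n : Int) (out : Int × Int) : Prop := out = go_alt n
instance (n : Int) (out : Int × Int) : Decidable (Spec_go n out) := by unfold Spec_go; infer_instance

-- ===== CLAIM (what is proved, stated in full; the proofs are below) =====
def Claim_equal_go : Prop := ∀ (n : Int), Dom_go n → Pre_go n → Spec_go n (go n)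

-- ===== LEMMAS AND PROOFS =====

theorem go_alt_eq_go (n : Int) (hn : 0 ≤ n) : go_alt n = go n := by
  unfold go_alt
  by_cases h0 : n = 0
  · subst h0
    rw [goBits, go]; simp
  · have hpos : 0 < n := by omega
    have hdnn : 0 ≤ PySem.Int.floordiv n 2 := by
      rw [PySem.Int.floordiv_eq_ediv_of_pos (by omega)]; omega
    have hdlt : PySem.Int.floordiv n 2 < n := by
      rw [PySem.Int.floordiv_eq_ediv_of_pos (by omega)]; omega
    rw [goBits, if_pos hpos]
    rw [List.reverse_cons, List.foldl_append]
    have ih := go_alt_eq_go (PySem.Int.floordiv n 2) hdnn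
    unfold go_alt at ih
    rw [ih]
    conv_rhs => rw [go, if_neg h0, if_neg (by omega)]
    by_cases hm : PySem.Int.mod n 2 = 0
    · simp [hm, goStep]
    · simp [hm, goStep, List.foldl_cons]
termination_by n.toNat
decreasing_by omega

-- ===== VERDICT (by name: the statement is the Claim_ definition above) =====
theorem go_spec : Claim_equal_go := by
  intro n _ hpre
  unfold Spec_go
  exact (go_alt_eq_go n hpre).symm
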